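-- pv_equiv track=rewrite | github.com/groeneveld/mdma-guide | audiobook/strip.py | strip_environment
-- ===== SOURCE A (Python) =====
-- def strip_environment(text, env_name):
--     """
--     Remove all occurrences of \\begin{env}...\\end{env} from text.
--     Returns the cleaned text and a count of removals.
--     """
--     begin_tag = f'\\begin{{{env_name}}}'
--     end_tag = f'\\end{{{env_name}}}'
--     result = []
--     count = 0
--     i = 0
--     while i < len(text):
--         idx = text.find(begin_tag, i)
--         if idx == -1:
--             result.append(text[i:])
--             break
--         result.append(text[i:idx])
--         end_idx = text.find(end_tag, idx)
--         if end_idx == -1: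
--             # Unmatched \begin — leave the rest as-is
--             result.append(text[idx:])
--             break
--         count += 1
--         i = end_idx + len(end_tag)
--     return ''.join(result), count
-- ===== SOURCE B (Python) =====
-- def _occurrences(text, sub):
--     """All start indices of sub in text, in ascending order (overlaps included)."""
--     out = []
--     i = text.find(sub)
--     while i != -1:
--         out.append(i)
--         i = text.find(sub, i + 1)
--     return out
--
--
-- def strip_environment(text, env_name):
--     """
--     Remove all occurrences of \\begin{env}...\\end{env} from text.
--     Returns the cleaned text and a count of removals.
--     """
--     begin_tag = f'\\begin{{{env_name}}}'
--     end_tag = f'\\end{{{env_name}}}'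
--     begins = _occurrences(text, begin_tag)
--     ends = _occurrences(text, end_tag)
--     pieces = []
--     count = 0
--     pos = 0
--     bi = ei = 0
--     while True:
--         while bi < len(begins) and begins[bi] < pos:
--             bi += 1
--         if bi == len(begins):
--             pieces.append(text[pos:])
--             break
--         start = begins[bi]
--         while ei < len(ends) and ends[ei] < start:
--             ei += 1
--         if ei == len(ends):
--             pieces.append(text[pos:])
--             break
--         pieces.append(text[pos:start])
--         count += 1
--         pos = ends[ei] + len(end_tag)
--     return ''.join(pieces), count
-- ===== Notes on version B (the rewrite author's own statement) =====
-- stated objective: alternative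
-- what changed: B first indexes the text once per tag (ascending lists of all begin-marker and end-marker start positions) and then pairs them with a two-pointer merge over the two sorted index lists, instead of A's single-cursor loop that interleaves find calls with slice arithmetic.
import Mathlib
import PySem

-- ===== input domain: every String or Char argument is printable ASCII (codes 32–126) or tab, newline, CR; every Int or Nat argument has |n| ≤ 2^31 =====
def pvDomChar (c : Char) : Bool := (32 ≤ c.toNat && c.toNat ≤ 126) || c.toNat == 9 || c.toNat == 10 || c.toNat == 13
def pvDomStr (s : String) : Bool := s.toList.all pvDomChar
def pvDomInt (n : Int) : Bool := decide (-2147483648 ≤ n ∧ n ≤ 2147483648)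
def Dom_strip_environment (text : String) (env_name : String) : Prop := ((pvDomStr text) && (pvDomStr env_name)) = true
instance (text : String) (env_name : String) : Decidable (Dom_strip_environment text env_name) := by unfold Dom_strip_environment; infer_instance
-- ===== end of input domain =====

-- B indexes the text once per tag (all marker start positions) and pairs begins with
-- ends by a two-pointer merge over the two sorted index lists (objective: alternative).

-- ===== PORT A =====
-- termination helper for A's while-loop (i strictly increases each iteration); cited in decreasing_by
theorem stripA_step_lt (t bt et : List Char) (hbt : bt ≠ []) (het : et ≠ []) (i : Nat)
    (hi : i < t.length)
    (hidx : ¬ PySem.Chars.findFrom t bt (i : Int) = -1)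
    (heidx : ¬ PySem.Chars.findFrom t et (PySem.Chars.findFrom t bt (i : Int)) = -1) :
    t.length - (PySem.Chars.findFrom t et (PySem.Chars.findFrom t bt (i : Int)) + (et.length : Int)).toNat
      < t.length - i := by
  obtain ⟨h1, h2, -⟩ := PySem.Chars.findFrom_natCast_spec t bt i (Nat.le_of_lt hi) hidx
  set idx := PySem.Chars.findFrom t bt (i : Int) with hidxdef
  have hidx0 : 0 ≤ idx := le_trans (by exact_mod_cast Nat.zero_le i) h1
  have hdropne : t.drop idx.toNat ≠ [] := by
    intro hnil
    rw [hnil] at h2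
    exact hbt (List.prefix_nil.mp h2)
  have hlt : idx.toNat < t.length := by
    by_contra hc
    exact hdropne (List.drop_eq_nil_iff.mpr (Nat.le_of_not_lt hc))
  have hcast : idx = ((idx.toNat : Nat) : Int) := (Int.toNat_of_nonneg hidx0).symm
  rw [hcast] at heidx
  obtain ⟨h3, -, -⟩ := PySem.Chars.findFrom_natCast_spec t et idx.toNat (Nat.le_of_lt hlt) heidx
  rw [hcast]
  have hetlen : 1 ≤ et.length := List.length_pos_iff.mpr het
  omega

def stripLoopA (t bt et : List Char) (hbt : bt ≠ []) (het : et ≠ []) (i : Nat)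
    (acc : List (List Char)) (count : Int) : List Char × Int :=
  if hi : i < t.length then
    if hidx : PySem.Chars.findFrom t bt (i : Int) = -1 then
      (PySem.Chars.join [] (acc ++ [PySem.Chars.slice t (some (i : Int)) none]), count)
    else if heidx : PySem.Chars.findFrom t et (PySem.Chars.findFrom t bt (i : Int)) = -1 then
      (PySem.Chars.join [] (acc ++
        [PySem.Chars.slice t (some (i : Int)) (some (PySem.Chars.findFrom t bt (i : Int))),
         PySem.Chars.slice t (some (PySem.Chars.findFrom t bt (i : Int))) none]), count)
    else
      stripLoopA t bt et hbt het
        (PySem.Chars.findFrom t et (PySem.Chars.findFrom t bt (i : Int)) + (et.length : Int)).toNat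
        (acc ++ [PySem.Chars.slice t (some (i : Int)) (some (PySem.Chars.findFrom t bt (i : Int)))])
        (count + 1)
  else (PySem.Chars.join [] acc, count)
termination_by t.length - i
decreasing_by exact stripA_step_lt t bt et hbt het i hi hidx heidx

-- the tags A and B build are never empty (both sides take this as an argument)
theorem begin_tag_ne (env_name : String) : ("\\begin{".toList ++ env_name.toList ++ "}".toList) ≠ [] := by simp
theorem end_tag_ne (env_name : String) : ("\\end{".toList ++ env_name.toList ++ "}".toList) ≠ [] := by simp

def strip_environment (text : String) (env_name : String) : String × Int :=
  -- begin_tag / end_tag are the f-strings of A, at the char level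
  let r := stripLoopA text.toList ("\\begin{".toList ++ env_name.toList ++ "}".toList)
    ("\\end{".toList ++ env_name.toList ++ "}".toList)
    (begin_tag_ne env_name) (end_tag_ne env_name) 0 [] 0
  (String.ofList r.1, r.2)

-- ===== PORT B =====
-- glue facts about the head of a dropWhile result, cited by stripLoopB's proof obligations
theorem dw_head_false {α : Type} {p : α → Bool} {l : List α} {a : α} {tl : List α}
    (h : l.dropWhile p = a :: tl) : p a = false := by
  have h1 : l.dropWhile p ≠ [] := by simp [h]
  have h2 := List.head_dropWhile_not p h1
  have h3 : (l.dropWhile p).head h1 = a := by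
    have h4 : (l.dropWhile p).head? = some a := by rw [h]; rfl
    simpa [List.head?_eq_some_head h1] using h4
  rw [h3] at h2
  simpa using h2
-- an occurrence found from i ≤ |t| starts at ≥ i and fits inside t; cited by occFrom
theorem occ_step (t sub : List Char) (hsub : sub ≠ []) (i : Nat) (hi : i ≤ t.length)
    (h : ¬ PySem.Chars.findFrom t sub (i : Int) = -1) :
    i ≤ (PySem.Chars.findFrom t sub (i : Int)).toNat ∧
      (PySem.Chars.findFrom t sub (i : Int)).toNat + sub.length ≤ t.length := by
  obtain ⟨h1, h2, -⟩ := PySem.Chars.findFrom_natCast_spec t sub i hi h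
  have hlen := h2.length_le
  rw [List.length_drop] at hlen
  have hpos : 1 ≤ sub.length := List.length_pos_iff.mpr hsub
  omega

-- the two facts occFrom needs, as named theorems (cited in its body and decreasing_by)
theorem occFrom_arg (t sub : List Char) (hsub : sub ≠ []) (i : Nat) (hi : i ≤ t.length)
    (h : ¬ PySem.Chars.findFrom t sub (i : Int) = -1) :
    (PySem.Chars.findFrom t sub (i : Int)).toNat + 1 ≤ t.length := by
  have hb := occ_step t sub hsub i hi h
  have hpos : 1 ≤ sub.length := List.length_pos_iff.mpr hsub
  omega
theorem occFrom_dec (t sub : List Char) (hsub : sub ≠ []) (i : Nat) (hi : i ≤ t.length)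
    (h : ¬ PySem.Chars.findFrom t sub (i : Int) = -1) :
    t.length + 1 - ((PySem.Chars.findFrom t sub (i : Int)).toNat + 1) < t.length + 1 - i := by
  have hb := occ_step t sub hsub i hi h
  omega
theorem occFrom_fit (t sub : List Char) (hsub : sub ≠ []) (i : Nat) (hi : i ≤ t.length)
    (h : ¬ PySem.Chars.findFrom t sub (i : Int) = -1) :
    (PySem.Chars.findFrom t sub (i : Int)).toNat + sub.length ≤ t.length :=
  (occ_step t sub hsub i hi h).2

-- _occurrences: every start index of sub in t from position i on, ascending (text.find chain);
-- each index is bundled with the fact that the occurrence fits inside t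
def occFrom (t sub : List Char) (hsub : sub ≠ []) (i : Nat) (hi : i ≤ t.length) :
    List {x : Nat // x + sub.length ≤ t.length} :=
  if h : PySem.Chars.findFrom t sub (i : Int) = -1 then []
  else
    ⟨(PySem.Chars.findFrom t sub (i : Int)).toNat, occFrom_fit t sub hsub i hi h⟩ ::
      occFrom t sub hsub ((PySem.Chars.findFrom t sub (i : Int)).toNat + 1)
        (occFrom_arg t sub hsub i hi h)
termination_by t.length + 1 - i
decreasing_by exact occFrom_dec t sub hsub i hi h

-- the decrease fact the two-pointer loop needs, as a named theorem (cited in decreasing_by)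
theorem stripB_dec (t bt et : List Char) (het : et ≠ []) (pos : Nat)
    {bs : List {x : Nat // x + bt.length ≤ t.length}}
    {es : List {x : Nat // x + et.length ≤ t.length}}
    (start : {x : Nat // x + bt.length ≤ t.length}) (e : {x : Nat // x + et.length ≤ t.length})
    {btl : List {x : Nat // x + bt.length ≤ t.length}}
    {etl : List {x : Nat // x + et.length ≤ t.length}}
    (hb : bs.dropWhile (fun b => decide (b.1 < pos)) = start :: btl)
    (he : es.dropWhile (fun x => decide (x.1 < start.1)) = e :: etl) :
    t.length + 1 - (e.1 + et.length) < t.length + 1 - pos := by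
  have h1 : decide (start.1 < pos) = false := dw_head_false (l := bs) hb
  have h2 : decide (e.1 < start.1) = false := dw_head_false (l := es) he
  have h3 : 1 ≤ et.length := List.length_pos_iff.mpr het
  have h4 := e.2
  simp only [decide_eq_false_iff_not, Nat.not_lt] at h1 h2
  omega

-- the two-pointer loop of B: advance each pointer (dropWhile), pair, cut, recurse
def stripLoopB (t bt et : List Char) (het : et ≠ []) (pos : Nat)
    (bs : List {x : Nat // x + bt.length ≤ t.length})
    (es : List {x : Nat // x + et.length ≤ t.length})
    (pieces : List (List Char)) (count : Int) : List Char × Int :=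
  match hb : bs.dropWhile (fun b => decide (b.1 < pos)) with
  | [] => (PySem.Chars.join [] (pieces ++ [PySem.Chars.slice t (some (pos : Int)) none]), count)
  | start :: btl =>
    match he : es.dropWhile (fun x => decide (x.1 < start.1)) with
    | [] => (PySem.Chars.join [] (pieces ++ [PySem.Chars.slice t (some (pos : Int)) none]), count)
    | e :: etl =>
      stripLoopB t bt et het (e.1 + et.length) (start :: btl) (e :: etl)
        (pieces ++ [PySem.Chars.slice t (some (pos : Int)) (some (start.1 : Int))]) (count + 1)
termination_by t.length + 1 - pos
decreasing_by exact stripB_dec t bt et het pos start e hb he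

def strip_environment_alt (text : String) (env_name : String) : String × Int :=
  let t := text.toList
  let bt := "\\begin{".toList ++ env_name.toList ++ "}".toList
  let et := "\\end{".toList ++ env_name.toList ++ "}".toList
  let r := stripLoopB t bt et (end_tag_ne env_name) 0
    (occFrom t bt (begin_tag_ne env_name) 0 (Nat.zero_le _))
    (occFrom t et (end_tag_ne env_name) 0 (Nat.zero_le _))
    [] 0
  (String.ofList r.1, r.2)

-- ===== PRECONDITION & SPEC =====
def Spec_strip_environment (text : String) (env_name : String) (out : String × Int) : Prop := out = strip_environment_alt text env_name
instance (text : String) (env_name : String) (out : String × Int) : Decidable (Spec_strip_environment text env_name out) := by unfold Spec_strip_environment; infer_instance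

-- ===== CLAIM (what is proved, stated in full; the proofs are below) =====
def Claim_equal_strip_environment : Prop := ∀ (text : String) (env_name : String), Dom_strip_environment text env_name → Spec_strip_environment text env_name (strip_environment text env_name)

-- ===== LEMMAS AND PROOFS =====
theorem join_empty_sep (l : List (List Char)) : PySem.Chars.join [] l = l.flatten := by
  induction l with
  | nil => simp [PySem.Chars.join_nil]
  | cons x r ih =>
    cases r with
    | nil => simp [PySem.Chars.join_singleton]
    | cons y r' => simp [PySem.Chars.join_cons_cons, ih]

-- no occurrence from i on ⇒ none from any j ≥ i on
theorem findFrom_none_mono (t sub : List Char) (i j : Nat) (hij : i ≤ j)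
    (hi : i ≤ t.length) (hj : j ≤ t.length)
    (h : PySem.Chars.findFrom t sub (i : Int) = -1) :
    PySem.Chars.findFrom t sub (j : Int) = -1 := by
  rw [PySem.Chars.findFrom_natCast_eq_neg_one_iff t sub i hi] at h
  rw [PySem.Chars.findFrom_natCast_eq_neg_one_iff t sub j hj]
  intro hinf
  apply h
  have hsuf : t.drop j <:+ t.drop i := by
    rw [show j = i + (j - i) from by omega, ← List.drop_drop]
    exact List.drop_suffix _ _
  exact hinf.trans hsuf.isInfix

-- if the first occurrence from i on starts at p ≥ j ≥ i, it is also the first from j on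
theorem findFrom_eq_of_between (t sub : List Char) (i j : Nat)
    (hi : i ≤ t.length) (hj : j ≤ t.length) (hij : i ≤ j)
    (h : ¬ PySem.Chars.findFrom t sub (i : Int) = -1)
    (hjp : j ≤ (PySem.Chars.findFrom t sub (i : Int)).toNat) :
    PySem.Chars.findFrom t sub (j : Int) = PySem.Chars.findFrom t sub (i : Int) := by
  obtain ⟨h1, h2, h3⟩ := PySem.Chars.findFrom_natCast_spec t sub i hi h
  set p := (PySem.Chars.findFrom t sub (i : Int)).toNat with hp
  have hne : ¬ PySem.Chars.findFrom t sub (j : Int) = -1 := by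
    rw [PySem.Chars.findFrom_natCast_eq_neg_one_iff t sub j hj]
    intro habs
    apply habs
    have hsuf : t.drop p <:+ t.drop j := by
      rw [show p = j + (p - j) from by omega, ← List.drop_drop]
      exact List.drop_suffix _ _
    exact h2.isInfix.trans hsuf.isInfix
  obtain ⟨g1, g2, g3⟩ := PySem.Chars.findFrom_natCast_spec t sub j hj hne
  set q := (PySem.Chars.findFrom t sub (j : Int)).toNat with hq
  have hqp : q = p := by
    by_contra hne'
    rcases Nat.lt_or_ge q p with hlt | hge
    · exact h3 q (by omega) hlt g2
    · have : q < p := by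
        by_contra hc
        exact g3 p hjp (by omega) h2
      omega
  have hp0 : 0 ≤ PySem.Chars.findFrom t sub (i : Int) := le_trans (by exact_mod_cast Nat.zero_le i) h1
  have hq0 : 0 ≤ PySem.Chars.findFrom t sub (j : Int) := le_trans (by exact_mod_cast Nat.zero_le j) g1
  omega

-- advancing a pointer past everything below j lands on the occurrence list computed from j
theorem dropWhile_occFrom (t sub : List Char) (hsub : sub ≠ []) :
    ∀ (n i j : Nat) (hi : i ≤ t.length) (hj : j ≤ t.length), i ≤ j → t.length + 1 - i ≤ n →
      (occFrom t sub hsub i hi).dropWhile (fun x => decide (x.1 < j)) = occFrom t sub hsub j hj := by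
  intro n
  induction n with
  | zero => intro i j hi hj hij hn; omega
  | succ n ih =>
    intro i j hi hj hij hn
    rw [occFrom]
    split
    · rename_i h
      rw [List.dropWhile_nil, occFrom, dif_pos (findFrom_none_mono t sub i j hij hi hj h)]
    · rename_i h
      have hb := occ_step t sub hsub i hi h
      set p := (PySem.Chars.findFrom t sub (i : Int)).toNat with hp
      by_cases hpj : p < j
      · rw [List.dropWhile_cons_of_pos (by simpa using hpj)]
        exact ih (p + 1) j (by omega) hj (by omega) (by omega)
      · rw [List.dropWhile_cons_of_neg (by simpa using hpj)]
        have hfj := findFrom_eq_of_between t sub i j hi hj hij h (by omega)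
        conv_rhs => rw [occFrom]
        rw [dif_neg (by rw [hfj]; exact h)]
        simp only [hfj]

-- a search started at the very end of the text finds nothing
theorem findFrom_len (t sub : List Char) (hsub : sub ≠ []) :
    PySem.Chars.findFrom t sub ((t.length : Nat) : Int) = -1 :=
  (PySem.Chars.findFrom_natCast_eq_neg_one_iff t sub t.length le_rfl).mpr
    (by simp [List.drop_length, List.infix_nil, hsub])

-- terminal case: A's cursor has reached the end, B's begin pointer runs off its list
theorem loopAB_done (t bt et : List Char) (hbt : bt ≠ []) (het : et ≠ [])
    (ib ie : Nat) (hib' : ib ≤ t.length) (hie' : ie ≤ t.length)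
    (acc : List (List Char)) (c : Int) :
    stripLoopA t bt et hbt het t.length acc c
      = stripLoopB t bt et het t.length (occFrom t bt hbt ib hib') (occFrom t et het ie hie')
          acc c := by
  have hocc : occFrom t bt hbt t.length le_rfl = [] := by
    rw [occFrom, dif_pos (findFrom_len t bt hbt)]
  have hdwb : (occFrom t bt hbt ib hib').dropWhile (fun x => decide (x.1 < t.length))
      = occFrom t bt hbt t.length le_rfl :=
    dropWhile_occFrom t bt hbt (t.length + 1) ib t.length hib' le_rfl hib' (by omega)
  rw [stripLoopA, dif_neg (lt_irrefl t.length), stripLoopB]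
  split
  · rename_i hb
    simp [join_empty_sep, PySem.Chars.slice_eq_listSlice, PySem.List.slice_from_natCast,
      List.drop_length]
  · rename_i start btl hb
    rw [hdwb, hocc] at hb
    exact absurd hb (by simp)

-- A's cursor loop equals B's two-pointer merge: A at position i, B with pointers that
-- have been advanced to some ib ≤ i (begins) and ie ≤ i (ends)
theorem loopAB (t bt et : List Char) (hbt : bt ≠ []) (het : et ≠ []) :
    ∀ (n i ib ie : Nat) (hib : ib ≤ i) (hie : ie ≤ i) (hi : i ≤ t.length)
      (hib' : ib ≤ t.length) (hie' : ie ≤ t.length)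
      (acc : List (List Char)) (c : Int), t.length - i ≤ n →
      stripLoopA t bt et hbt het i acc c
        = stripLoopB t bt et het i (occFrom t bt hbt ib hib') (occFrom t et het ie hie')
            acc c := by
  intro n
  induction n with
  | zero =>
    intro i ib ie hib hie hi hib' hie' acc c hn
    have hieq : i = t.length := by omega
    subst hieq
    exact loopAB_done t bt et hbt het ib ie hib' hie' acc c
  | succ n ih =>
    intro i ib ie hib hie hi hib' hie' acc c hn
    by_cases hilen : i < t.length
    case neg =>
      have hieq : i = t.length := by omega
      subst hieq
      exact loopAB_done t bt et hbt het ib ie hib' hie' acc c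
    have hdwb : (occFrom t bt hbt ib hib').dropWhile (fun x => decide (x.1 < i))
        = occFrom t bt hbt i hi :=
      dropWhile_occFrom t bt hbt (t.length + 1) ib i hib' hi hib (by omega)
    rw [stripLoopA, dif_pos hilen]
    by_cases hidx : PySem.Chars.findFrom t bt (i : Int) = -1
    · -- no begin marker left: both emit the tail and stop
      rw [dif_pos hidx]
      have hocc : occFrom t bt hbt i hi = [] := by rw [occFrom, dif_pos hidx]
      rw [stripLoopB]
      split
      · rfl
      · rename_i start btl hb
        rw [hdwb, hocc] at hb
        exact absurd hb (by simp)
    · -- begin marker at p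
      rw [dif_neg hidx]
      obtain ⟨hip, hpfit⟩ := occ_step t bt hbt i hi hidx
      set p := (PySem.Chars.findFrom t bt (i : Int)).toNat with hpdef
      have hp0 : 0 ≤ PySem.Chars.findFrom t bt (i : Int) := by
        obtain ⟨h1, -, -⟩ := PySem.Chars.findFrom_natCast_spec t bt i hi hidx
        exact le_trans (by exact_mod_cast Nat.zero_le i) h1
      have hcast : PySem.Chars.findFrom t bt (i : Int) = (p : Int) :=
        (Int.toNat_of_nonneg hp0).symm
      have hbt1 : 1 ≤ bt.length := List.length_pos_iff.mpr hbt
      have hple : p ≤ t.length := by omega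
      have hoccb : occFrom t bt hbt i hi
          = ⟨p, occFrom_fit t bt hbt i hi hidx⟩ :: occFrom t bt hbt (p + 1) (by omega) := by
        rw [occFrom, dif_neg hidx]
      have hdwe : (occFrom t et het ie hie').dropWhile (fun x => decide (x.1 < p))
          = occFrom t et het p hple :=
        dropWhile_occFrom t et het (t.length + 1) ie p hie' hple (by omega) (by omega)
      by_cases heidx : PySem.Chars.findFrom t et (PySem.Chars.findFrom t bt (i : Int)) = -1
      · -- unmatched begin: keep the rest verbatim, stop
        rw [dif_pos heidx]
        have hocce : occFrom t et het p hple = [] := by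
          rw [occFrom, dif_pos (by rw [← hcast]; exact heidx)]
        rw [stripLoopB]
        split
        · rename_i hb
          rw [hdwb, hoccb] at hb
          exact absurd hb (by simp)
        · rename_i start btl hb
          rw [hdwb, hoccb] at hb
          obtain ⟨rfl, rfl⟩ := List.cons.injEq .. |>.mp hb
          split
          · -- both return; the two slices of A glue to B's single tail slice
            rw [hcast]
            simp only [join_empty_sep, List.flatten_append, List.flatten_cons,
              List.flatten_nil, List.append_nil, Prod.mk.injEq,
              PySem.Chars.slice_eq_listSlice, PySem.List.slice_natCast,
              PySem.List.slice_from_natCast]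
            refine ⟨?_, trivial⟩
            have hdp : t.drop p = (t.drop i).drop (p - i) := by
              rw [List.drop_drop]
              congr 1
              omega
            rw [hdp, List.take_append_drop]
          · rename_i e etl he
            rw [hdwe, hocce] at he
            exact absurd he (by simp)
      · -- full environment: strip it, count it, continue after the end marker
        rw [dif_neg heidx]
        have heidx' : ¬ PySem.Chars.findFrom t et ((p : Nat) : Int) = -1 := by
          rw [← hcast]; exact heidx
        obtain ⟨hpe, hefit⟩ := occ_step t et het p hple heidx'
        have hetlen : 1 ≤ et.length := List.length_pos_iff.mpr het
        set e := (PySem.Chars.findFrom t et ((p : Nat) : Int)).toNat with hedef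
        have he0 : 0 ≤ PySem.Chars.findFrom t et ((p : Nat) : Int) := by
          obtain ⟨h1, -, -⟩ := PySem.Chars.findFrom_natCast_spec t et p hple heidx'
          exact le_trans (by exact_mod_cast Nat.zero_le p) h1
        have hocce : occFrom t et het p hple
            = ⟨e, occFrom_fit t et het p hple heidx'⟩ :: occFrom t et het (e + 1) (by omega) := by
          rw [occFrom, dif_neg heidx']
        have hnew : (PySem.Chars.findFrom t et (PySem.Chars.findFrom t bt (i : Int))
            + (et.length : Int)).toNat = e + et.length := by
          rw [hcast]
          omega
        have hrec := ih (e + et.length) i p (by omega) (by omega) (by omega) hi hple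
          (acc ++ [PySem.Chars.slice t (some (i : Int)) (some ((p : Nat) : Int))]) (c + 1)
          (by omega)
        rw [hnew, hcast]
        conv_rhs => rw [stripLoopB]
        split
        · rename_i hb
          rw [hdwb, hoccb] at hb
          exact absurd hb (by simp)
        · rename_i start btl hb
          rw [hdwb, hoccb] at hb
          obtain ⟨rfl, rfl⟩ := List.cons.injEq .. |>.mp hb
          split
          · rename_i he
            rw [hdwe, hocce] at he
            exact absurd he (by simp)
          · rename_i e' etl he
            rw [hdwe, hocce] at he
            obtain ⟨rfl, rfl⟩ := List.cons.injEq .. |>.mp he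
            convert hrec using 2
            · exact hoccb.symm
            · exact hocce.symm

-- ===== VERDICT (by name: the statement is the Claim_ definition above) =====
theorem strip_environment_spec : Claim_equal_strip_environment := by
  intro text env_name _hdom
  unfold Spec_strip_environment strip_environment strip_environment_alt
  have h := loopAB text.toList ("\\begin{".toList ++ env_name.toList ++ "}".toList)
    ("\\end{".toList ++ env_name.toList ++ "}".toList)
    (begin_tag_ne env_name) (end_tag_ne env_name) text.toList.length 0 0 0
    (Nat.zero_le _) (Nat.zero_le _) (Nat.zero_le _) (Nat.zero_le _) (Nat.zero_le _)
    [] 0 (by omega)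
  rw [h]
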